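-- pv_equiv track=rewrite | github.com/alexandradanca/HangMan_Game_PY | functions.py | display_word_mode
-- ===== SOURCE A (Python) =====
-- def add_letters(random_word, my_word, indexes):
--     my_word = list(my_word)
--
--     for i in indexes:
--         my_word[i] = random_word[i]
--
--     return ''.join(my_word)
--
-- def get_letter_positions(word, letter):
--     return [i for i, l in enumerate(word) if l == letter]
--
-- def display_word_mode(word, mode, user_input=None, current_word=""):
--     new_word = current_word
--
--     match mode:
--         case "start_game":
--             for x in range(0, len(word)):
--                 if x == 0 or x == len(word)-1:
--                     new_word += word[x]
--                 else:
--                     new_word += "_"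
--
--         case "replace_letter":
--             idxs = get_letter_positions(word, user_input)
--             if len(idxs) > 0:
--                 new_word = add_letters(word, new_word, idxs)
--
--     return new_word
-- ===== SOURCE B (Python) =====
-- def display_word_mode(word, mode, user_input=None, current_word=""):
--     if mode == "start_game":
--         n = len(word)
--         if n <= 1:
--             return current_word + word
--         return current_word + word[0] + '_' * (n - 2) + word[-1]
--     if mode == "replace_letter":
--         return ''.join(w if w == user_input else c
--                        for w, c in zip(word, current_word)) \
--                + current_word[len(word):]
--     return current_word
-- ===== Notes on version B (the rewrite author's own statement) =====
-- stated objective: simpler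
-- what changed: start_game's per-index loop with repeated concatenation becomes the closed form first + '_'*(n-2) + last; replace_letter's build-index-list-then-patch pair (get_letter_positions + add_letters) becomes a direct zip of word with current_word choosing per position, with no index table, no list mutation and no non-empty check.
import Mathlib
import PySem

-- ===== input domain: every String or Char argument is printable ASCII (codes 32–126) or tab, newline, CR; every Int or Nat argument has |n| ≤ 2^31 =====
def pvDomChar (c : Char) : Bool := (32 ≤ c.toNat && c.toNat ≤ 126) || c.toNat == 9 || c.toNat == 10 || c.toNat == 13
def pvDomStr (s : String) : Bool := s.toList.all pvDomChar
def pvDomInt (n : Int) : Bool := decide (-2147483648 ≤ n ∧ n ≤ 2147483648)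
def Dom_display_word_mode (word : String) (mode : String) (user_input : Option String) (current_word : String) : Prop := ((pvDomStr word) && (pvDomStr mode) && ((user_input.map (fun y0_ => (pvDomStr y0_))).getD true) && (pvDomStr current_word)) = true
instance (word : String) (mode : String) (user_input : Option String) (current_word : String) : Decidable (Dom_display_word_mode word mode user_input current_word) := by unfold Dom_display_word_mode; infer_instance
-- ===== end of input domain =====

-- B: start_game as the closed form first + '_'*(n-2) + last; replace_letter as a zip of word with current_word (no index table, no patching). Objective: simpler.


-- ===== PORT A =====
-- add_letters: my_word as char list; my_word[i] = random_word[i] for each index.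
-- Indexes come from enumerate so they are ≥ 0 and < len(random_word); Pre_ guarantees i < len(my_word),
-- so '.set i.toNat' / 'getD' are exact here (Python raises IndexError outside Pre_).
def pv_add_letters (random_word : String) (my_word : String) (indexes : List Int) : String :=
  String.ofList (indexes.foldl (fun acc i => acc.set i.toNat (random_word.toList.getD i.toNat ' ')) my_word.toList)

-- get_letter_positions: [i for i, l in enumerate(word) if l == letter]  (l is a 1-char string; == None or a non-equal string is False)
def pv_get_letter_positions (word : String) (letter : Option String) : List Int :=
  (PySem.List.enumerate word.toList).filterMap (fun p => if some (String.singleton p.2) = letter then some p.1 else none)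

def display_word_mode (word : String) (mode : String) (user_input : Option String) (current_word : String) : String :=
  if mode = "start_game" then
    -- for x in range(0, len(word)): new_word += word[x] if x == 0 or x == len(word)-1 else "_"
    String.ofList ((List.range word.toList.length).foldl
      (fun acc x => acc ++ (if x = 0 ∨ x = word.toList.length - 1 then [word.toList.getD x ' '] else ['_']))
      current_word.toList)
  else if mode = "replace_letter" then
    let idxs := pv_get_letter_positions word user_input
    if idxs.length > 0 then pv_add_letters word current_word idxs else current_word
  else current_word

-- ===== PORT B =====
def display_word_mode_alt (word : String) (mode : String) (user_input : Option String) (current_word : String) : String :=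
  if mode = "start_game" then
    let n := word.toList.length
    if n ≤ 1 then String.ofList (current_word.toList ++ word.toList)
    else String.ofList (current_word.toList ++ [word.toList.getD 0 ' '] ++
                    List.replicate (n - 2) '_' ++ [word.toList.getD (n - 1) ' '])  -- word[-1], exact since n ≥ 2
  else if mode = "replace_letter" then
    String.ofList (((word.toList.zip current_word.toList).map
        (fun p => if some (String.singleton p.1) = user_input then p.1 else p.2)) ++
      current_word.toList.drop word.toList.length)
  else current_word

-- ===== PRECONDITION & SPEC =====
-- Pre_ excludes only the inputs where Python A raises IndexError: mode "replace_letter" with some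
-- occurrence of user_input in word at an index ≥ len(current_word).
def Pre_display_word_mode (word : String) (mode : String) (user_input : Option String) (current_word : String) : Prop :=
  mode = "replace_letter" →
    ∀ p ∈ PySem.List.enumerate word.toList, some (String.singleton p.2) = user_input →
      p.1 < (current_word.toList.length : Int)
instance (word : String) (mode : String) (user_input : Option String) (current_word : String) : Decidable (Pre_display_word_mode word mode user_input current_word) := by unfold Pre_display_word_mode; infer_instance
def pvWitness_display_word_mode : String × String × Option String × String := ("cat", "replace_letter", some "a", "___")

def Spec_display_word_mode (word : String) (mode : String) (user_input : Option String) (current_word : String) (out : String) : Prop := out = display_word_mode_alt word mode user_input current_word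
instance (word : String) (mode : String) (user_input : Option String) (current_word : String) (out : String) : Decidable (Spec_display_word_mode word mode user_input current_word out) := by unfold Spec_display_word_mode; infer_instance

-- ===== CLAIM (what is proved, stated in full; the proofs are below) =====
def Claim_equal_display_word_mode : Prop := ∀ (word : String) (mode : String) (user_input : Option String) (current_word : String), Dom_display_word_mode word mode user_input current_word → Pre_display_word_mode word mode user_input current_word → Spec_display_word_mode word mode user_input current_word (display_word_mode word mode user_input current_word)

-- ===== LEMMAS AND PROOFS =====

-- start_game: the append-accumulating fold over range equals init ++ the per-index pieces.
theorem pv_fold_append_range {α : Type} (f : Nat → List α) :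
    ∀ (n : Nat) (init : List α),
      (List.range n).foldl (fun acc x => acc ++ f x) init = init ++ (List.range n).flatMap f := by
  intro n
  induction n with
  | zero => simp
  | succ n ih =>
    intro init
    simp [List.range_succ, List.foldl_append, ih]

theorem pv_flatMap_eq_map {α β : Type} (l : List α) (f : α → List β) (g : α → β)
    (h : ∀ x, f x = [g x]) : l.flatMap f = l.map g := by
  induction l with
  | nil => simp
  | cons a l ih => simp [h, ih]

-- mapping "first/last kept, middle constant" over range (m+2) is B's closed form
theorem pv_map_range_if {α : Type} (m : Nat) (h : Nat → α) (c : α) :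
    (List.range (m + 2)).map (fun x => if x = 0 ∨ x = m + 2 - 1 then h x else c)
      = [h 0] ++ List.replicate m c ++ [h (m + 1)] := by
  rw [show m + 2 = (m + 1) + 1 from rfl, List.range_succ, List.map_append,
    List.range_succ_eq_map, List.map_cons, List.map_map]
  have hmid : (List.range m).map ((fun x => if x = 0 ∨ x = m + 1 + 1 - 1 then h x else c) ∘ (· + 1))
      = List.replicate m c := by
    rw [List.eq_replicate_iff]
    refine ⟨by simp, ?_⟩
    intro b hb
    rw [List.mem_map] at hb
    obtain ⟨x, hx, rfl⟩ := hb
    rw [List.mem_range] at hx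
    simp only [Function.comp]
    rw [if_neg (by omega)]
  rw [hmid]
  simp

-- the flatMap over range of A's per-index piece is B's closed form
theorem pv_flatMap_closed (w : List Char) (hn : 2 ≤ w.length) :
    (List.range w.length).flatMap
        (fun x => if x = 0 ∨ x = w.length - 1 then [w.getD x ' '] else ['_']) =
      [w.getD 0 ' '] ++ List.replicate (w.length - 2) '_' ++ [w.getD (w.length - 1) ' '] := by
  rw [pv_flatMap_eq_map _ _ (fun x => if x = 0 ∨ x = w.length - 1 then w.getD x ' ' else '_')
    (by intro x; by_cases h : x = 0 ∨ x = w.length - 1 <;> simp [h])]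
  obtain ⟨m, hm⟩ : ∃ m, w.length = m + 2 := ⟨w.length - 2, by omega⟩
  rw [hm]
  simpa using pv_map_range_if m (fun x => w.getD x ' ') '_'

-- pointwise value of A's set-fold (the value written at a position depends only on the position)
theorem pv_setfold_getElem? (v : Nat → Char) :
    ∀ (idxs : List Int) (l : List Char) (j : Nat),
      (idxs.foldl (fun acc i => acc.set i.toNat (v i.toNat)) l)[j]?
        = if (∃ i ∈ idxs, i.toNat = j) ∧ j < l.length then some (v j) else l[j]? := by
  intro idxs
  induction idxs with
  | nil => intro l j; simp
  | cons a idxs ih =>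
    intro l j
    rw [List.foldl_cons, ih _ j]
    by_cases hm : (∃ i ∈ idxs, i.toNat = j) ∧ j < (l.set a.toNat (v a.toNat)).length
    · rw [if_pos hm]
      rw [if_pos ⟨⟨hm.1.choose, List.mem_cons_of_mem _ hm.1.choose_spec.1, hm.1.choose_spec.2⟩,
        by simpa using hm.2⟩]
    · rw [if_neg hm]
      by_cases ha : a.toNat = j ∧ j < l.length
      · rw [if_pos ⟨⟨a, List.mem_cons_self .., ha.1⟩, ha.2⟩, ← ha.1,
          List.getElem?_set_self (by simpa [ha.1] using ha.2)]
      · rw [if_neg (by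
          rintro ⟨⟨i, hi, hij⟩, hlt⟩
          rcases List.mem_cons.mp hi with rfl | hi'
          · exact ha ⟨hij, hlt⟩
          · exact hm ⟨⟨i, hi', hij⟩, by simpa using hlt⟩)]
        rcases Nat.lt_or_ge j l.length with hjl | hjl
        · rw [List.getElem?_set_ne (fun h => ha ⟨h, hjl⟩)]
        · rw [List.getElem?_eq_none (by simpa using hjl), List.getElem?_eq_none hjl]

-- membership in get_letter_positions
theorem pv_mem_idxs (w : List Char) (u : Option String) (i : Int) :
    i ∈ (PySem.List.enumerate w).filterMap
        (fun p => if some (String.singleton p.2) = u then some p.1 else none)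
      ↔ ∃ k : Nat, k < w.length ∧ (k : Int) = i ∧ some (String.singleton (w.getD k ' ')) = u := by
  simp only [List.mem_filterMap]
  constructor
  · rintro ⟨p, hp, hf⟩
    rw [PySem.List.mem_enumerate_iff] at hp
    obtain ⟨k, hk, rfl⟩ := hp
    by_cases hc : some (String.singleton (w[k])) = u
    · simp only [hc] at hf
      exact ⟨k, hk, by simpa using hf, by simpa [List.getD, List.getElem?_eq_getElem hk] using hc⟩
    · simp [hc] at hf
  · rintro ⟨k, hk, rfl, hc⟩
    refine ⟨((k : Int), w[k]), ?_, ?_⟩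
    · rw [PySem.List.mem_enumerate_iff]; exact ⟨k, hk, by simp⟩
    · have : some (String.singleton (w[k])) = u := by
        simpa [List.getD, List.getElem?_eq_getElem hk] using hc
      simp [this]

-- the zip-map's element at a position inside both lists
theorem pv_zipmap_getElem? (w l : List Char) (u : Option String) (j : Nat)
    (h1 : j < w.length) (h2 : j < l.length) :
    (List.map (fun p => if some (String.singleton p.1) = u then p.1 else p.2) (w.zip l))[j]?
      = some (if some (String.singleton (w.getD j ' ')) = u then w.getD j ' ' else l.getD j ' ') := by
  rw [List.getElem?_eq_getElem (by rw [List.length_map, List.length_zip]; omega)]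
  rw [List.getElem_map, List.getElem_zip]
  simp [List.getD, List.getElem?_eq_getElem h1, List.getElem?_eq_getElem h2]

-- replace_letter core: A's patch-by-indices equals B's zip (out-of-range sets are no-ops on both)
theorem pv_replace_eq (w l : List Char) (u : Option String) :
    ((PySem.List.enumerate w).filterMap
        (fun p => if some (String.singleton p.2) = u then some p.1 else none)).foldl
      (fun acc i => acc.set i.toNat (w.getD i.toNat ' ')) l
    = ((w.zip l).map (fun p => if some (String.singleton p.1) = u then p.1 else p.2)) ++
        l.drop w.length := by
  apply List.ext_getElem?
  intro j
  rw [pv_setfold_getElem? (fun j => w.getD j ' ')]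
  rw [List.getElem?_append, List.getElem?_drop]
  simp only [List.length_map, List.length_zip]
  by_cases hjb : j < w.length ∧ j < l.length
  · rw [if_pos (lt_min_iff.mpr hjb), pv_zipmap_getElem? w l u j hjb.1 hjb.2]
    by_cases hc : some (String.singleton (w.getD j ' ')) = u
    · rw [if_pos ⟨⟨(j : Int), (pv_mem_idxs w u _).mpr ⟨j, hjb.1, rfl, hc⟩, by simp⟩, hjb.2⟩,
        if_pos hc]
    · rw [if_neg (by
        rintro ⟨⟨i, hi, rfl⟩, -⟩
        rw [pv_mem_idxs] at hi
        obtain ⟨k, hk, hki, hu⟩ := hi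
        have hkj : k = i.toNat := by omega
        exact hc (by rwa [← hkj])),
        if_neg hc, List.getElem?_eq_getElem hjb.2]
      simp [List.getD, List.getElem?_eq_getElem hjb.2]
  · rw [if_neg (fun h => hjb (lt_min_iff.mp h))]
    by_cases hjl : j < l.length
    · have hwj : w.length ≤ j := by omega
      rw [if_neg (by
        rintro ⟨⟨i, hi, rfl⟩, -⟩
        rw [pv_mem_idxs] at hi
        obtain ⟨k, hk, hki, -⟩ := hi
        omega)]
      rw [Nat.min_eq_left (by omega : w.length ≤ l.length)]
      congr 1
      omega
    · rw [if_neg (fun h => hjl h.2), List.getElem?_eq_none (by omega : l.length ≤ j),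
        List.getElem?_eq_none (by
          have h2 := Nat.min_le_right w.length l.length
          omega)]

-- when there is no occurrence at all, B's zip is the identity on current_word
theorem pv_zip_id (w l : List Char) (u : Option String)
    (hno : ∀ k : Nat, k < w.length → ¬ some (String.singleton (w.getD k ' ')) = u) :
    ((w.zip l).map (fun p => if some (String.singleton p.1) = u then p.1 else p.2)) ++
        l.drop w.length = l := by
  apply List.ext_getElem?
  intro j
  rw [List.getElem?_append, List.getElem?_drop]
  simp only [List.length_map, List.length_zip]
  by_cases hjb : j < w.length ∧ j < l.length
  · rw [if_pos (lt_min_iff.mpr hjb), pv_zipmap_getElem? w l u j hjb.1 hjb.2,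
      if_neg (hno j hjb.1), List.getElem?_eq_getElem hjb.2]
    simp [List.getD, List.getElem?_eq_getElem hjb.2]
  · rw [if_neg (fun h => hjb (lt_min_iff.mp h))]
    by_cases hjl : j < l.length
    · rw [Nat.min_eq_left (by omega : w.length ≤ l.length)]
      congr 1
      omega
    · rw [List.getElem?_eq_none (by
          have h2 := Nat.min_le_right w.length l.length
          omega),
        List.getElem?_eq_none (by omega : l.length ≤ j)]

-- ===== VERDICT (by name: the statement is the Claim_ definition above) =====
theorem display_word_mode_spec : Claim_equal_display_word_mode := by
  intro word mode user_input current_word _ _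
  unfold Spec_display_word_mode display_word_mode display_word_mode_alt
  by_cases h1 : mode = "start_game"
  · simp only [h1]
    rw [pv_fold_append_range
      (fun x => if x = 0 ∨ x = word.toList.length - 1 then [word.toList.getD x ' '] else ['_'])]
    by_cases hn : word.toList.length ≤ 1
    · rw [if_pos hn]
      rcases hw : word.toList with _ | ⟨c, _ | _⟩ <;> simp_all
    · rw [if_neg hn, pv_flatMap_closed word.toList (by omega)]
      simp
  · by_cases h2 : mode = "replace_letter"
    · simp only [h2, if_neg (by decide : ¬ ("replace_letter" : String) = "start_game")]
      unfold pv_get_letter_positions pv_add_letters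
      by_cases hE : ((PySem.List.enumerate word.toList).filterMap
          (fun p => if some (String.singleton p.2) = user_input then some p.1 else none)).length > 0
      · rw [if_pos hE, pv_replace_eq word.toList current_word.toList user_input]
      · rw [if_neg hE]
        have hempty : ((PySem.List.enumerate word.toList).filterMap
            (fun p => if some (String.singleton p.2) = user_input then some p.1 else none)) = [] :=
          List.eq_nil_of_length_eq_zero (by omega)
        have hno : ∀ k : Nat, k < word.toList.length →
            ¬ some (String.singleton (word.toList.getD k ' ')) = user_input := by
          intro k hk hc
          have hmem : (k : Int) ∈ ((PySem.List.enumerate word.toList).filterMap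
              (fun p => if some (String.singleton p.2) = user_input then some p.1 else none)) :=
            (pv_mem_idxs _ _ _).mpr ⟨k, hk, rfl, hc⟩
          rw [hempty] at hmem
          simp at hmem
        rw [pv_zip_id word.toList current_word.toList user_input hno]
        exact (String.ofList_toList (s := current_word)).symm
    · simp [h1, h2]
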